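-- pv_equiv track=rewrite | github.com/abhinayy0/dsalogo | kickstart/a_1_2022.py | new_password
-- ===== SOURCE A (Python) =====
-- def new_password(string, n):
--
--     specials =  ["#","@", "*","&"]
--     upper=False
--     lower=False
--     digit=False
--     special=False
--     # letters, digits, and special characters
--     for char in string:
--         if char.isupper():
--             upper=True
--         if char in specials:
--             special=True
--         if char.islower():
--             lower=True
--         if char.isdigit():
--             digit=True
--     newstring=string
--     if not lower:
--         newstring= string +"a"
--     if not upper:
--         newstring=newstring+"A"
--     if not digit:
--         newstring =newstring+"1"
--     if not special:
--         newstring =newstring+"@"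
--
--     while len(newstring) <7:
--         newstring =newstring+"@"
--     return newstring
-- ===== SOURCE B (Python) =====
-- def new_password(string, n):
--     # Repair loop: repeatedly re-validate the whole password and append one
--     # fix for the first violated rule, until every rule is satisfied.
--     specials = "#@*&"
--     pw = string
--     while True:
--         if not any(c.islower() for c in pw):
--             pw += "a"
--         elif not any(c.isupper() for c in pw):
--             pw += "A"
--         elif not any(c.isdigit() for c in pw):
--             pw += "1"
--         elif not any(c in specials for c in pw):
--             pw += "@"
--         elif len(pw) < 7:
--             pw += "@"
--         else:
--             return pw
-- ===== Notes on version B (the rewrite author's own statement) =====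
-- stated objective: alternative
-- what changed: A scans the string once to set four flags, then does conditional appends plus a pad loop; B is a repair fixpoint loop that repeatedly re-validates the whole current password and appends one fix for the first violated rule (lower, upper, digit, special, length) until all rules hold.
import Mathlib
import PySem

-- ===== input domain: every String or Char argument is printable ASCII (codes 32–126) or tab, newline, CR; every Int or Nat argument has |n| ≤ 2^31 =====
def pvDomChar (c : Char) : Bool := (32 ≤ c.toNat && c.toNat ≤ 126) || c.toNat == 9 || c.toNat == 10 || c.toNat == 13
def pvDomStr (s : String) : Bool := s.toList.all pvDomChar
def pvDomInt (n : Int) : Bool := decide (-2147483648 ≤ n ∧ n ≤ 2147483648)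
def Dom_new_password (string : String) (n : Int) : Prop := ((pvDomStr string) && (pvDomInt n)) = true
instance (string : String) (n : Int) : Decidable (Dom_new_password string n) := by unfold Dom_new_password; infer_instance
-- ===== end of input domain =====

-- B replaces A's flag-scan + conditional appends + pad loop with a repair fixpoint that re-validates the whole password each iteration and appends one fix for the first violated rule (alternative decomposition, same cost).


-- ===== PORT A =====
-- A's specials list (["#","@","*","&"], single-character strings; membership = char membership)
def pvSpecialsA : List Char := ['#', '@', '*', '&']

-- A's trailing `while len(newstring) < 7: newstring += "@"`, step for step
def pvPadLoopA (cs : List Char) : List Char :=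
  if cs.length < 7 then pvPadLoopA (cs ++ ['@']) else cs
termination_by 7 - cs.length
decreasing_by simp_all; omega

-- one iteration of A's for-loop body (flags = (upper, special, lower, digit))
def pvStepA (st : Bool × Bool × Bool × Bool) (char : Char) : Bool × Bool × Bool × Bool :=
  let st := if PySem.Chars.isupper char then (true, st.2.1, st.2.2.1, st.2.2.2) else st
  let st := if char ∈ pvSpecialsA then (st.1, true, st.2.2.1, st.2.2.2) else st
  let st := if PySem.Chars.islower char then (st.1, st.2.1, true, st.2.2.2) else st
  let st := if PySem.Chars.isdigit char then (st.1, st.2.1, st.2.2.1, true) else st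
  st

def new_password (string : String) (n : Int) : String :=
  -- the single for-loop maintaining the four flags
  let flags := string.toList.foldl pvStepA (false, false, false, false)
  let newstring := string.toList
  let newstring := if ¬ flags.2.2.1 then string.toList ++ ['a'] else newstring
  let newstring := if ¬ flags.1 then newstring ++ ['A'] else newstring
  let newstring := if ¬ flags.2.2.2 then newstring ++ ['1'] else newstring
  let newstring := if ¬ flags.2.1 then newstring ++ ['@'] else newstring
  String.ofList (pvPadLoopA newstring)

-- ===== PORT B =====
-- B's `specials = "#@*&"` (membership test on the string's characters)
def pvSpecialsB : List Char := "#@*&".toList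

-- evaluated character facts about the four fix characters (cited by the termination proof below)
theorem pvCF_la : PySem.Chars.islower 'a' = true := by decide
theorem pvCF_uA : PySem.Chars.isupper 'A' = true := by decide
theorem pvCF_d1 : PySem.Chars.isdigit '1' = true := by decide
theorem pvCF_sq : decide ('@' ∈ pvSpecialsB) = true := by decide

-- B's repair-loop measure: number of unsatisfied class rules plus missing length (cited by the termination proof)
def pvMeasB (pw : List Char) : Nat :=
  (if pw.any PySem.Chars.islower then 0 else 1) +
  (if pw.any PySem.Chars.isupper then 0 else 1) +
  (if pw.any PySem.Chars.isdigit then 0 else 1) +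
  (if pw.any (fun c => c ∈ pvSpecialsB) then 0 else 1) + (7 - pw.length)

-- small hand-built facts used by the termination proofs (kept term-small on purpose)
theorem pvAny_app (pw : List Char) (f : Char → Bool) (c : Char) :
    (pw ++ [c]).any f = (pw.any f || f c) := by
  rw [List.any_append, List.any_cons, List.any_nil, Bool.or_false]

theorem pvLen_app (pw : List Char) (c : Char) : (pw ++ [c]).length = pw.length + 1 := by
  rw [List.length_append, List.length_cons, List.length_nil]

theorem pvIndLe (x y : Bool) :
    (if (x || y) = true then 0 else 1) ≤ (if x = true then 0 else 1) := by
  cases x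
  · cases y
    · exact Nat.le_refl 1
    · exact Nat.zero_le 1
  · exact Nat.le_refl 0

theorem pvIndLt (x y : Bool) (hx : ¬ x = true) (hy : y = true) :
    (if (x || y) = true then 0 else 1) < (if x = true then 0 else 1) := by
  cases x
  · rw [hy]
    exact Nat.zero_lt_one
  · exact absurd rfl hx

theorem pvLenLe (n : Nat) : 7 - (n + 1) ≤ 7 - n :=
  Nat.sub_le_sub_left (Nat.le_succ n) 7

theorem pvLenLt (n : Nat) (h : n < 7) : 7 - (n + 1) < 7 - n :=
  Nat.sub_succ_lt_self 7 n h

theorem pvCombo1 {a1 b1 a2 b2 a3 b3 a4 b4 a5 b5 : Nat}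
    (h1 : a1 < b1) (h2 : a2 ≤ b2) (h3 : a3 ≤ b3) (h4 : a4 ≤ b4) (h5 : a5 ≤ b5) :
    a1 + a2 + a3 + a4 + a5 < b1 + b2 + b3 + b4 + b5 :=
  Nat.add_lt_add_of_lt_of_le
    (Nat.add_lt_add_of_lt_of_le (Nat.add_lt_add_of_lt_of_le (Nat.add_lt_add_of_lt_of_le h1 h2) h3) h4) h5

theorem pvCombo2 {a1 b1 a2 b2 a3 b3 a4 b4 a5 b5 : Nat}
    (h1 : a1 ≤ b1) (h2 : a2 < b2) (h3 : a3 ≤ b3) (h4 : a4 ≤ b4) (h5 : a5 ≤ b5) :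
    a1 + a2 + a3 + a4 + a5 < b1 + b2 + b3 + b4 + b5 :=
  Nat.add_lt_add_of_lt_of_le
    (Nat.add_lt_add_of_lt_of_le (Nat.add_lt_add_of_lt_of_le (Nat.add_lt_add_of_le_of_lt h1 h2) h3) h4) h5

theorem pvCombo3 {a1 b1 a2 b2 a3 b3 a4 b4 a5 b5 : Nat}
    (h1 : a1 ≤ b1) (h2 : a2 ≤ b2) (h3 : a3 < b3) (h4 : a4 ≤ b4) (h5 : a5 ≤ b5) :
    a1 + a2 + a3 + a4 + a5 < b1 + b2 + b3 + b4 + b5 :=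
  Nat.add_lt_add_of_lt_of_le
    (Nat.add_lt_add_of_lt_of_le (Nat.add_lt_add_of_le_of_lt (Nat.add_le_add h1 h2) h3) h4) h5

theorem pvCombo4 {a1 b1 a2 b2 a3 b3 a4 b4 a5 b5 : Nat}
    (h1 : a1 ≤ b1) (h2 : a2 ≤ b2) (h3 : a3 ≤ b3) (h4 : a4 < b4) (h5 : a5 ≤ b5) :
    a1 + a2 + a3 + a4 + a5 < b1 + b2 + b3 + b4 + b5 :=
  Nat.add_lt_add_of_lt_of_le
    (Nat.add_lt_add_of_le_of_lt (Nat.add_le_add (Nat.add_le_add h1 h2) h3) h4) h5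

theorem pvCombo5 {a1 b1 a2 b2 a3 b3 a4 b4 a5 b5 : Nat}
    (h1 : a1 ≤ b1) (h2 : a2 ≤ b2) (h3 : a3 ≤ b3) (h4 : a4 ≤ b4) (h5 : a5 < b5) :
    a1 + a2 + a3 + a4 + a5 < b1 + b2 + b3 + b4 + b5 :=
  Nat.add_lt_add_of_le_of_lt
    (Nat.add_le_add (Nat.add_le_add (Nat.add_le_add h1 h2) h3) h4) h5

theorem pvMeasB_a (pw : List Char) (h : ¬ pw.any PySem.Chars.islower = true) :
    pvMeasB (pw ++ ['a']) < pvMeasB pw := by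
  rw [pvMeasB, pvMeasB, pvAny_app, pvAny_app, pvAny_app, pvAny_app, pvLen_app]
  exact pvCombo1 (pvIndLt _ _ h pvCF_la) (pvIndLe _ _) (pvIndLe _ _) (pvIndLe _ _) (pvLenLe _)

theorem pvMeasB_A (pw : List Char) (h : ¬ pw.any PySem.Chars.isupper = true) :
    pvMeasB (pw ++ ['A']) < pvMeasB pw := by
  rw [pvMeasB, pvMeasB, pvAny_app, pvAny_app, pvAny_app, pvAny_app, pvLen_app]
  exact pvCombo2 (pvIndLe _ _) (pvIndLt _ _ h pvCF_uA) (pvIndLe _ _) (pvIndLe _ _) (pvLenLe _)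

theorem pvMeasB_1 (pw : List Char) (h : ¬ pw.any PySem.Chars.isdigit = true) :
    pvMeasB (pw ++ ['1']) < pvMeasB pw := by
  rw [pvMeasB, pvMeasB, pvAny_app, pvAny_app, pvAny_app, pvAny_app, pvLen_app]
  exact pvCombo3 (pvIndLe _ _) (pvIndLe _ _) (pvIndLt _ _ h pvCF_d1) (pvIndLe _ _) (pvLenLe _)

theorem pvMeasB_q (pw : List Char) (h : ¬ (pw.any fun c => decide (c ∈ pvSpecialsB)) = true) :
    pvMeasB (pw ++ ['@']) < pvMeasB pw := by
  rw [pvMeasB, pvMeasB, pvAny_app, pvAny_app, pvAny_app, pvAny_app, pvLen_app]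
  exact pvCombo4 (pvIndLe _ _) (pvIndLe _ _) (pvIndLe _ _) (pvIndLt _ _ h pvCF_sq) (pvLenLe _)

theorem pvMeasB_len (pw : List Char) (h : pw.length < 7) :
    pvMeasB (pw ++ ['@']) < pvMeasB pw := by
  rw [pvMeasB, pvMeasB, pvAny_app, pvAny_app, pvAny_app, pvAny_app, pvLen_app]
  exact pvCombo5 (pvIndLe _ _) (pvIndLe _ _) (pvIndLe _ _) (pvIndLe _ _) (pvLenLt _ h)

-- B's `while True:` repair loop: append a fix for the first violated rule, else return
def pvRepairB (pw : List Char) : List Char :=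
  if ¬ pw.any PySem.Chars.islower then pvRepairB (pw ++ ['a'])
  else if ¬ pw.any PySem.Chars.isupper then pvRepairB (pw ++ ['A'])
  else if ¬ pw.any PySem.Chars.isdigit then pvRepairB (pw ++ ['1'])
  else if ¬ pw.any (fun c => c ∈ pvSpecialsB) then pvRepairB (pw ++ ['@'])
  else if pw.length < 7 then pvRepairB (pw ++ ['@'])
  else pw
termination_by pvMeasB pw
decreasing_by
  · exact pvMeasB_a pw ‹_›
  · exact pvMeasB_A pw ‹_›
  · exact pvMeasB_1 pw ‹_›
  · exact pvMeasB_q pw ‹_›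
  · exact pvMeasB_len pw ‹_›

def new_password_alt (string : String) (n : Int) : String :=
  String.ofList (pvRepairB string.toList)

-- ===== PRECONDITION & SPEC =====
def Spec_new_password (string : String) (n : Int) (out : String) : Prop := out = new_password_alt string n
instance (string : String) (n : Int) (out : String) : Decidable (Spec_new_password string n out) := by unfold Spec_new_password; infer_instance

-- ===== CLAIM (what is proved, stated in full; the proofs are below) =====
def Claim_equal_new_password : Prop := ∀ (string : String) (n : Int), Dom_new_password string n → Spec_new_password string n (new_password string n)

-- ===== LEMMAS AND PROOFS =====

-- evaluated character facts about the fix characters, used by the stage lemmas below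
theorem pvCF_ua : PySem.Chars.isupper 'a' = false := by decide
theorem pvCF_da : PySem.Chars.isdigit 'a' = false := by decide
theorem pvCF_sa : decide ('a' ∈ pvSpecialsB) = false := by decide
theorem pvCF_dA : PySem.Chars.isdigit 'A' = false := by decide
theorem pvCF_sA : decide ('A' ∈ pvSpecialsB) = false := by decide
theorem pvCF_s1 : decide ('1' ∈ pvSpecialsB) = false := by decide

-- A's fold computes exactly the four any-scans
theorem pvStepA_eq (st : Bool × Bool × Bool × Bool) (c : Char) :
    pvStepA st c = (st.1 || PySem.Chars.isupper c, st.2.1 || decide (c ∈ pvSpecialsA),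
                    st.2.2.1 || PySem.Chars.islower c, st.2.2.2 || PySem.Chars.isdigit c) := by
  obtain ⟨u, sp, l, d⟩ := st
  unfold pvStepA
  cases h1 : PySem.Chars.isupper c <;> cases h2 : decide (c ∈ pvSpecialsA) <;>
    cases h3 : PySem.Chars.islower c <;> cases h4 : PySem.Chars.isdigit c <;>
    simp_all

theorem pvFlags_eq (cs : List Char) (u sp l d : Bool) :
    cs.foldl pvStepA (u, sp, l, d)
    = (u || cs.any PySem.Chars.isupper,
       sp || cs.any (fun c => decide (c ∈ pvSpecialsA)),
       l || cs.any PySem.Chars.islower,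
       d || cs.any PySem.Chars.isdigit) := by
  induction cs generalizing u sp l d with
  | nil => simp
  | cons c cs ih =>
    simp only [List.foldl_cons, List.any_cons, pvStepA_eq, ih, Bool.or_assoc]

-- A's pad loop equals the closed-form replicate pad
theorem pvPadLoopA_eq (cs : List Char) :
    pvPadLoopA cs = cs ++ List.replicate (7 - cs.length) '@' := by
  by_cases h : cs.length < 7
  · rw [pvPadLoopA, if_pos h, pvPadLoopA_eq (cs ++ ['@'])]
    have h7 : 7 - cs.length = (7 - (cs ++ ['@']).length) + 1 := by simp; omega
    simp [h7, List.replicate_succ]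
  · rw [pvPadLoopA, if_neg h]
    have : 7 - cs.length = 0 := by omega
    simp [this]
termination_by 7 - cs.length
decreasing_by simp_all; omega

-- once the four class rules hold, B's repair loop only pads to length 7
theorem pvRepairB_pad (cs : List Char)
    (hl : cs.any PySem.Chars.islower) (hu : cs.any PySem.Chars.isupper)
    (hd : cs.any PySem.Chars.isdigit) (hs : cs.any (fun c => c ∈ pvSpecialsB)) :
    pvRepairB cs = cs ++ List.replicate (7 - cs.length) '@' := by
  by_cases h : cs.length < 7
  · rw [pvRepairB]
    rw [if_neg (by simp [hl]), if_neg (by simp [hu]), if_neg (by simp [hd]), if_neg (by simp [hs]), if_pos h]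
    rw [pvRepairB_pad (cs ++ ['@'])
      (by simp [List.any_append, hl]) (by simp [List.any_append, hu])
      (by simp [List.any_append, hd]) (by simp [List.any_append, pvSpecialsB])]
    have h7 : 7 - cs.length = (7 - (cs ++ ['@']).length) + 1 := by simp; omega
    simp [h7, List.replicate_succ]
  · rw [pvRepairB]
    rw [if_neg (by simp [hl]), if_neg (by simp [hu]), if_neg (by simp [hd]), if_neg (by simp [hs]), if_neg h]
    have : 7 - cs.length = 0 := by omega
    simp [this]
termination_by 7 - cs.length
decreasing_by simp_all; omega

-- stage 4: lower/upper/digit already present, the special-rule check remains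
theorem pvRepairB_s4 (cs : List Char)
    (hl : cs.any PySem.Chars.islower) (hu : cs.any PySem.Chars.isupper)
    (hd : cs.any PySem.Chars.isdigit) :
    pvRepairB cs =
      (let o := if ¬ cs.any (fun c => c ∈ pvSpecialsB) then cs ++ ['@'] else cs
       o ++ List.replicate (7 - o.length) '@') := by
  by_cases hs : cs.any (fun c => c ∈ pvSpecialsB)
  · simp only [hs, not_true_eq_false, if_false]
    exact pvRepairB_pad cs hl hu hd hs
  · rw [pvRepairB, if_neg (by simp [hl]), if_neg (by simp [hu]), if_neg (by simp [hd]), if_pos hs]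
    rw [pvRepairB_pad (cs ++ ['@'])
      (by simp [List.any_append, hl]) (by simp [List.any_append, hu])
      (by simp [List.any_append, hd]) (by simp [List.any_append, pvCF_sq])]
    simp [hs]

-- stage 3: lower/upper already present
theorem pvRepairB_s3 (cs : List Char)
    (hl : cs.any PySem.Chars.islower) (hu : cs.any PySem.Chars.isupper) :
    pvRepairB cs =
      (let o := if ¬ cs.any PySem.Chars.isdigit then cs ++ ['1'] else cs
       let o := if ¬ cs.any (fun c => c ∈ pvSpecialsB) then o ++ ['@'] else o
       o ++ List.replicate (7 - o.length) '@') := by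
  by_cases hd : cs.any PySem.Chars.isdigit
  · simp only [hd, not_true_eq_false, if_false]
    exact pvRepairB_s4 cs hl hu hd
  · rw [pvRepairB, if_neg (by simp [hl]), if_neg (by simp [hu]), if_pos hd]
    rw [pvRepairB_s4 (cs ++ ['1'])
      (by simp [List.any_append, hl]) (by simp [List.any_append, hu])
      (by simp [List.any_append, pvCF_d1])]
    simp [hd, List.any_append, pvCF_s1]

-- stage 2: lower already present
theorem pvRepairB_s2 (cs : List Char)
    (hl : cs.any PySem.Chars.islower) :
    pvRepairB cs =
      (let o := if ¬ cs.any PySem.Chars.isupper then cs ++ ['A'] else cs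
       let o := if ¬ cs.any PySem.Chars.isdigit then o ++ ['1'] else o
       let o := if ¬ cs.any (fun c => c ∈ pvSpecialsB) then o ++ ['@'] else o
       o ++ List.replicate (7 - o.length) '@') := by
  by_cases hu : cs.any PySem.Chars.isupper
  · simp only [hu, not_true_eq_false, if_false]
    exact pvRepairB_s3 cs hl hu
  · rw [pvRepairB, if_neg (by simp [hl]), if_pos hu]
    rw [pvRepairB_s3 (cs ++ ['A'])
      (by simp [List.any_append, hl]) (by simp [List.any_append, pvCF_uA])]
    simp [hu, List.any_append, pvCF_dA, pvCF_sA]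

-- B's repair loop equals A's canonical form: conditional appends (flags of the original) then the pad
theorem pvRepairB_eq (cs : List Char) :
    pvRepairB cs =
      (let o := if ¬ cs.any PySem.Chars.islower then cs ++ ['a'] else cs
       let o := if ¬ cs.any PySem.Chars.isupper then o ++ ['A'] else o
       let o := if ¬ cs.any PySem.Chars.isdigit then o ++ ['1'] else o
       let o := if ¬ cs.any (fun c => c ∈ pvSpecialsB) then o ++ ['@'] else o
       o ++ List.replicate (7 - o.length) '@') := by
  by_cases hl : cs.any PySem.Chars.islower
  · simp only [hl, not_true_eq_false, if_false]
    exact pvRepairB_s2 cs hl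
  · rw [pvRepairB, if_pos hl]
    rw [pvRepairB_s2 (cs ++ ['a']) (by simp [List.any_append, pvCF_la])]
    simp [hl, List.any_append, pvCF_ua, pvCF_da, pvCF_sa]

-- ===== VERDICT (by name: the statement is the Claim_ definition above) =====
theorem new_password_spec : Claim_equal_new_password := by
  intro s n _
  unfold Spec_new_password new_password new_password_alt
  rw [pvRepairB_eq]
  have hsp : (fun c => decide (c ∈ pvSpecialsB)) = (fun c => decide (c ∈ pvSpecialsA)) := by
    funext c; simp [pvSpecialsA, pvSpecialsB]
  simp only [pvFlags_eq, pvPadLoopA_eq, Bool.false_or, hsp]
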